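-- pv_equiv track=rewrite | github.com/MustafaHaddara/P0CompilerOpts | CGopts.py | deadStoreEliminationFromBlock
-- ===== SOURCE A (Python) =====
-- def deadStoreEliminationFromBlock(block):
--     readAddresses = {}
--     result = []
--     for elem in block[::-1]:
--         (_,ins,_) = elem
--         # assuming all targets for branch/jump instructions are labels
--         if ins.startswith('lw'):
--             # this is a read
--             t,reg,loc = ins.split()
--             readAddresses[loc] = True
--             result.append(elem)
--         elif ins.startswith('sw'):
--             # this is a write
--             t,reg,loc = ins.split()
--             # if we're writing here and we've read from it before, keep the instruction
--             # otherwise we discard it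
--             if loc in readAddresses and readAddresses[loc]:
--                 result.append(elem)
--                 readAddresses[loc] = False
--         else:
--             result.append(elem)
--     return result[::-1]
-- ===== SOURCE B (Python) =====
-- def deadStoreEliminationFromBlock(block):
--     # Forward pass: a store is kept iff the next instruction touching its
--     # location (looking ahead) is a load; everything else is always kept.
--     def nextEventIsLoad(loc, rest):
--         for (_, ins, _) in rest:
--             if ins.startswith('lw') or ins.startswith('sw'):
--                 _, _, l = ins.split()
--                 if l == loc:
--                     return ins.startswith('lw')
--         return False
--
--     result = []
--     rest = list(block)
--     while rest:
--         elem, rest = rest[0], rest[1:]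
--         (_, ins, _) = elem
--         if ins.startswith('sw'):
--             _, _, loc = ins.split()
--             if nextEventIsLoad(loc, rest):
--                 result.append(elem)
--         else:
--             result.append(elem)
--     return result
-- ===== Notes on version B (the rewrite author's own statement) =====
-- stated objective: alternative
-- what changed: Replaced the backward pass that threads a read-liveness dict through the reversed block by a forward pass that keeps a store iff a per-store lookahead finds that the next instruction touching its location is a load.
import Mathlib
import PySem

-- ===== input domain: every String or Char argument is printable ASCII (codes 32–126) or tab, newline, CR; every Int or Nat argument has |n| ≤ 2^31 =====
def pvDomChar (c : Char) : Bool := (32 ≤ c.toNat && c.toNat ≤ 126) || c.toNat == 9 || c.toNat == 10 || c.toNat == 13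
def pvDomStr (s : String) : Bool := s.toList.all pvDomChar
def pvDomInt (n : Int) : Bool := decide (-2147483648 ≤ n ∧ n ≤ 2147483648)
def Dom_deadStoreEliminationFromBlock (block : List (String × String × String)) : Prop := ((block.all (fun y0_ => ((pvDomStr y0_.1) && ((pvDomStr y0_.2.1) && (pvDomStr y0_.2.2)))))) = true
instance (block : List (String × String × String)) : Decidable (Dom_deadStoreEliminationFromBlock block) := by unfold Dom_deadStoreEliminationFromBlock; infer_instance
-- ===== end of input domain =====

-- B replaces A's backward liveness-dict pass by a forward pass with per-store lookahead (alternative decomposition, not faster).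

-- ===== PORT A =====
-- one iteration of A's loop over block[::-1]; state = (readAddresses, result)
def pvStepA (st : PySem.Dict String Bool × List (String × String × String))
    (elem : String × String × String) :
    PySem.Dict String Bool × List (String × String × String) :=
  let ins := elem.2.1
  if PySem.Str.startswith ins "lw" then
    match PySem.Str.split₀ ins with
    | [_, _, loc] => (st.1.insert loc true, st.2 ++ [elem])
    | _ => st  -- ValueError in Python; excluded by Pre_
  else if PySem.Str.startswith ins "sw" then
    match PySem.Str.split₀ ins with
    | [_, _, loc] =>
        if st.1.getD loc false then (st.1.insert loc false, st.2 ++ [elem])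
        else st
    | _ => st  -- ValueError in Python; excluded by Pre_
  else (st.1, st.2 ++ [elem])

def deadStoreEliminationFromBlock (block : List (String × String × String)) : List (String × String × String) :=
  ((block.reverse).foldl pvStepA (PySem.Dict.empty, [])).2.reverse

-- ===== PORT B =====
-- B's helper: scan ahead; the first lw/sw of loc decides (load -> keep the store)
def pvNextEventIsLoad (loc : String) : List (String × String × String) → Bool
  | [] => false
  | e :: rest =>
    let ins := e.2.1
    if PySem.Str.startswith ins "lw" || PySem.Str.startswith ins "sw" then
      match PySem.Str.split₀ ins with
      | [_, _, l] => if l = loc then PySem.Str.startswith ins "lw" else pvNextEventIsLoad loc rest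
      | _ => pvNextEventIsLoad loc rest  -- ValueError in Python; excluded by Pre_
    else pvNextEventIsLoad loc rest

-- B's main loop: consume the block front-to-back, keep a store iff its next event is a load
def pvAltAux : List (String × String × String) → List (String × String × String)
  | [] => []
  | e :: rest =>
    let ins := e.2.1
    if PySem.Str.startswith ins "sw" then
      match PySem.Str.split₀ ins with
      | [_, _, loc] =>
          if pvNextEventIsLoad loc rest then e :: pvAltAux rest else pvAltAux rest
      | _ => pvAltAux rest  -- ValueError in Python; excluded by Pre_
    else e :: pvAltAux rest

def deadStoreEliminationFromBlock_alt (block : List (String × String × String)) : List (String × String × String) :=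
  pvAltAux block

-- ===== PRECONDITION & SPEC =====
-- Pre_ excludes exactly the inputs where A raises ValueError: an instruction starting
-- with 'lw'/'sw' whose whitespace split does not have exactly 3 fields.
def Pre_deadStoreEliminationFromBlock (block : List (String × String × String)) : Prop :=
  ∀ e ∈ block, (PySem.Str.startswith e.2.1 "lw" || PySem.Str.startswith e.2.1 "sw") = true →
    (PySem.Str.split₀ e.2.1).length = 3
instance (block : List (String × String × String)) : Decidable (Pre_deadStoreEliminationFromBlock block) := by unfold Pre_deadStoreEliminationFromBlock; infer_instance
def pvWitness_deadStoreEliminationFromBlock : (List (String × String × String)) :=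
  [("l0", "sw $t0 x", ""), ("l1", "lw $t1 x", ""), ("l2", "sw $t2 x", ""), ("l3", "add $t0 $t1", "")]
def Spec_deadStoreEliminationFromBlock (block : List (String × String × String)) (out : List (String × String × String)) : Prop := out = deadStoreEliminationFromBlock_alt block
instance (block : List (String × String × String)) (out : List (String × String × String)) : Decidable (Spec_deadStoreEliminationFromBlock block out) := by unfold Spec_deadStoreEliminationFromBlock; infer_instance

-- ===== CLAIM (what is proved, stated in full; the proofs are below) =====
def Claim_equal_deadStoreEliminationFromBlock : Prop := ∀ (block : List (String × String × String)), Dom_deadStoreEliminationFromBlock block → Pre_deadStoreEliminationFromBlock block → Spec_deadStoreEliminationFromBlock block (deadStoreEliminationFromBlock block)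

-- ===== LEMMAS AND PROOFS =====

theorem pv_lw_not_sw (s : List Char) (h : PySem.Chars.startswith s ['l', 'w'] = true) :
    PySem.Chars.startswith s ['s', 'w'] = false := by
  rw [Bool.eq_false_iff]
  intro hc
  rw [PySem.Chars.startswith_iff] at h hc
  obtain ⟨t, ht⟩ := h
  obtain ⟨u, hu⟩ := hc
  have heq : (['l', 'w'] ++ t : List Char) = ['s', 'w'] ++ u := ht.trans hu.symm
  simp at heq

-- the invariant of A's backward fold: the dict flag for loc says that the next
-- event of loc in the (not yet processed) forward suffix is a load, and the
-- reversed result is B's output on that suffix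
theorem pv_inv (l : List (String × String × String))
    (hpre : ∀ e ∈ l, (PySem.Str.startswith e.2.1 "lw" || PySem.Str.startswith e.2.1 "sw") = true →
      (PySem.Str.split₀ e.2.1).length = 3) :
    (∀ loc, (l.foldr (fun x st => pvStepA st x) (PySem.Dict.empty, [])).1.getD loc false
        = pvNextEventIsLoad loc l)
    ∧ (l.foldr (fun x st => pvStepA st x) (PySem.Dict.empty, [])).2.reverse = pvAltAux l := by
  induction l with
  | nil =>
    exact ⟨fun loc => by simp [pvNextEventIsLoad, PySem.Dict.getD_empty], by simp [pvAltAux]⟩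
  | cons x rest ih =>
    obtain ⟨ihd, ihr⟩ := ih (fun e he h => hpre e (List.mem_cons_of_mem _ he) h)
    simp only [List.foldr_cons]
    set st := rest.foldr (fun x st => pvStepA st x) (PySem.Dict.empty, ([] : List (String × String × String))) with hst
    by_cases hlw : PySem.Chars.startswith x.2.1.toList ['l', 'w'] = true
    · have hsw := pv_lw_not_sw _ hlw
      obtain ⟨a, b, c, habc⟩ :=
        List.length_eq_three.mp (hpre x List.mem_cons_self (by simp [hlw]))
      refine ⟨fun loc => ?_, ?_⟩
      · by_cases hc : loc = c
        · subst hc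
          simp [pvStepA, hlw, habc, pvNextEventIsLoad, PySem.Dict.getD_insert_self]
        · simp [pvStepA, hlw, habc, pvNextEventIsLoad, PySem.Dict.getD_insert,
            hc, Ne.symm hc, ihd]
      · simp [pvStepA, pvAltAux, hlw, hsw, habc, ihr]
    · rw [Bool.not_eq_true] at hlw
      by_cases hsw : PySem.Chars.startswith x.2.1.toList ['s', 'w'] = true
      · obtain ⟨a, b, c, habc⟩ :=
          List.length_eq_three.mp (hpre x List.mem_cons_self (by simp [hsw]))
        have hflag : _ = pvNextEventIsLoad c rest := ihd c
        cases hnev : pvNextEventIsLoad c rest with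
        | true =>
          refine ⟨fun loc => ?_, ?_⟩
          · by_cases hc : loc = c
            · subst hc
              simp [pvStepA, hlw, hsw, habc, pvNextEventIsLoad, hflag, hnev,
                PySem.Dict.getD_insert_self]
            · simp [pvStepA, hlw, hsw, habc, pvNextEventIsLoad, hflag, hnev,
                PySem.Dict.getD_insert, hc, Ne.symm hc, ihd]
          · simp [pvStepA, pvAltAux, hlw, hsw, habc, hflag, hnev, ihr]
        | false =>
          refine ⟨fun loc => ?_, ?_⟩
          · by_cases hc : loc = c
            · subst hc
              simp [pvStepA, hlw, hsw, habc, pvNextEventIsLoad, hflag, hnev]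
            · simp [pvStepA, hlw, hsw, habc, pvNextEventIsLoad, hflag, hnev,
                Ne.symm hc, ihd]
          · simp [pvStepA, pvAltAux, hlw, hsw, habc, hflag, hnev, ihr]
      · rw [Bool.not_eq_true] at hsw
        refine ⟨fun loc => ?_, ?_⟩
        · simp [pvStepA, pvNextEventIsLoad, hlw, hsw, ihd]
        · simp [pvStepA, pvAltAux, hlw, hsw, ihr]

-- ===== VERDICT (by name: the statement is the Claim_ definition above) =====
theorem deadStoreEliminationFromBlock_spec : Claim_equal_deadStoreEliminationFromBlock := by
  intro block _ hpre
  unfold Spec_deadStoreEliminationFromBlock deadStoreEliminationFromBlock deadStoreEliminationFromBlock_alt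
  rw [List.foldl_reverse]
  exact (pv_inv block hpre).2
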